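-- pv_equiv track=rewrite | github.com/Kaisergichuche/aegis-prime-mvp | core/orchestrator.py | _parse_llm_output
-- ===== SOURCE A (Python) =====
-- def _parse_llm_output(text):
--     lines = text.split('\n')
--     verdict = "Unknown"
--     explanation = text
--     for line in lines:
--         if line.lower().startswith("verdict:"):
--             verdict = line.split(":", 1)[1].strip().capitalize()
--         elif line.lower().startswith("explanation:"):
--             explanation = line.split(":", 1)[1].strip()
--     if verdict not in ["Malicious", "Suspicious", "Benign", "Unknown"]:
--         verdict = "Unknown"
--     return verdict, explanation
-- ===== SOURCE B (Python) =====
-- def _parse_llm_output(text):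
--     # Backward scan: take the payload of the last matching line directly,
--     # instead of folding "last wins" state through every line.
--     lines = text.split('\n')
--
--     def last_payload(prefix):
--         return next((line.split(":", 1)[1].strip()
--                      for line in reversed(lines)
--                      if line.lower().startswith(prefix)), None)
--
--     v = last_payload("verdict:")
--     verdict = v.capitalize() if v is not None else "Unknown"
--     if verdict not in {"Malicious", "Suspicious", "Benign", "Unknown"}:
--         verdict = "Unknown"
--     e = last_payload("explanation:")
--     return verdict, (text if e is None else e)
-- ===== Notes on version B (the rewrite author's own statement) =====
-- stated objective: alternative
-- what changed: Replaces the forward last-wins state fold over all lines by two backward scans that return the payload of the first matching line in reversed order (next over a reversed generator), with validation applied to the extracted value.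
import Mathlib
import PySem

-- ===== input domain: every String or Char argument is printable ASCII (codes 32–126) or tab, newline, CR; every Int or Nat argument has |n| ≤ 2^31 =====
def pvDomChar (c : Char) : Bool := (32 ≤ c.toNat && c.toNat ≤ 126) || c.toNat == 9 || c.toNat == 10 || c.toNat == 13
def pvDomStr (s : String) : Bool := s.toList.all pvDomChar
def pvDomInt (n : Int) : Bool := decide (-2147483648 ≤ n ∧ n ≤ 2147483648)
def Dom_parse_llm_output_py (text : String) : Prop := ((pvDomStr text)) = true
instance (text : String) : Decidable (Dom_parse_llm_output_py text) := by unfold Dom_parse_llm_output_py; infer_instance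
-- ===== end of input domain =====

-- B replaces A's forward last-wins fold by two backward first-match scans; objective: alternative (same cost).

-- shared primitives (Python's str.capitalize and line.split(":", 1)[1])
-- s.capitalize(): first char uppercased, the rest lowercased (exact on ASCII)
def pyCapitalize (s : String) : String :=
  match s.toList with
  | [] => s
  | c :: rest => String.ofList (PySem.Chars.upperChar c :: PySem.Chars.lower rest)

-- line.split(":", 1)[1] — exact whenever the line contains ':' (every guarded line does)
def afterColon (l : String) : String :=
  (PySem.List.pyGet? ((PySem.Str.splitMax? l ":" 1).getD []) 1).getD ""

-- ===== PORT A =====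
def parseLoopA : List String → String × String → String × String
  | [], st => st
  | line :: rest, (v, e) =>
    if PySem.Str.startswith (PySem.Str.lower line) "verdict:" then
      parseLoopA rest (pyCapitalize (PySem.Str.strip (afterColon line)), e)
    else if PySem.Str.startswith (PySem.Str.lower line) "explanation:" then
      parseLoopA rest (v, PySem.Str.strip (afterColon line))
    else
      parseLoopA rest (v, e)

def parse_llm_output_py (text : String) : String × String :=
  let lines := (PySem.Str.split? text "\n").getD []
  let st := parseLoopA lines ("Unknown", text)
  let verdict := if st.1 ∈ ["Malicious", "Suspicious", "Benign", "Unknown"] then st.1 else "Unknown"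
  (verdict, st.2)

-- ===== PORT B =====
-- next((line.split(":",1)[1].strip() for line in reversed(lines) if line.lower().startswith(pre)), None)
def lastPayload (lines : List String) (pre : String) : Option String :=
  (lines.reverse.find? (fun line => PySem.Str.startswith (PySem.Str.lower line) pre)).map
    (fun line => PySem.Str.strip (afterColon line))

def parse_llm_output_py_alt (text : String) : String × String :=
  let lines := (PySem.Str.split? text "\n").getD []
  let verdict0 := match lastPayload lines "verdict:" with
    | some v => pyCapitalize v
    | none => "Unknown"
  let verdict := if verdict0 ∈ ["Malicious", "Suspicious", "Benign", "Unknown"] then verdict0 else "Unknown"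
  (verdict, (lastPayload lines "explanation:").getD text)

-- ===== PRECONDITION & SPEC =====
def Spec_parse_llm_output_py (text : String) (out : String × String) : Prop := out = parse_llm_output_py_alt text
instance (text : String) (out : String × String) : Decidable (Spec_parse_llm_output_py text out) := by unfold Spec_parse_llm_output_py; infer_instance

-- ===== CLAIM (what is proved, stated in full; the proofs are below) =====
def Claim_equal_parse_llm_output_py : Prop := ∀ (text : String), Dom_parse_llm_output_py text → Spec_parse_llm_output_py text (parse_llm_output_py text)

-- ===== LEMMAS AND PROOFS =====

-- a line cannot start with both "verdict:" and "explanation:"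
theorem excl_ve (l : String) :
    PySem.Str.startswith (PySem.Str.lower l) "verdict:" = true →
    ¬ PySem.Str.startswith (PySem.Str.lower l) "explanation:" = true := by
  intro hv h
  simp only [PySem.Str.startswith_eq, PySem.Chars.startswith_iff] at hv h
  rcases hv with ⟨t1, h1⟩
  rcases h with ⟨t2, h2⟩
  rw [← h2] at h1
  simp at h1

theorem loopA_eq (ls : List String) (v e : String) :
    parseLoopA ls (v, e) =
      ((match ls.reverse.find? (fun l => PySem.Str.startswith (PySem.Str.lower l) "verdict:") with
        | some l => pyCapitalize (PySem.Str.strip (afterColon l))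
        | none => v),
       (match ls.reverse.find? (fun l => PySem.Str.startswith (PySem.Str.lower l) "explanation:") with
        | some l => PySem.Str.strip (afterColon l)
        | none => e)) := by
  induction ls generalizing v e with
  | nil => simp [parseLoopA]
  | cons line rest ih =>
    simp only [parseLoopA, List.reverse_cons, List.find?_append]
    by_cases hv : PySem.Str.startswith (PySem.Str.lower line) "verdict:" = true
    · have he : PySem.Str.startswith (PySem.Str.lower line) "explanation:" = false :=
        Bool.not_eq_true _ ▸ excl_ve line hv
      rw [if_pos hv, ih]
      simp only [List.find?_cons, List.find?_nil, hv, he]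
      cases rest.reverse.find? (fun l => PySem.Str.startswith (PySem.Str.lower l) "verdict:") <;>
      cases rest.reverse.find? (fun l => PySem.Str.startswith (PySem.Str.lower l) "explanation:") <;>
        rfl
    · have hv' : PySem.Str.startswith (PySem.Str.lower line) "verdict:" = false :=
        Bool.not_eq_true _ ▸ hv
      rw [if_neg hv]
      by_cases he : PySem.Str.startswith (PySem.Str.lower line) "explanation:" = true
      · rw [if_pos he, ih]
        simp only [List.find?_cons, List.find?_nil, hv', he]
        cases rest.reverse.find? (fun l => PySem.Str.startswith (PySem.Str.lower l) "verdict:") <;>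
        cases rest.reverse.find? (fun l => PySem.Str.startswith (PySem.Str.lower l) "explanation:") <;>
          rfl
      · have he' : PySem.Str.startswith (PySem.Str.lower line) "explanation:" = false :=
          Bool.not_eq_true _ ▸ he
        rw [if_neg he, ih]
        simp only [List.find?_cons, List.find?_nil, hv', he']
        cases rest.reverse.find? (fun l => PySem.Str.startswith (PySem.Str.lower l) "verdict:") <;>
        cases rest.reverse.find? (fun l => PySem.Str.startswith (PySem.Str.lower l) "explanation:") <;>
          rfl

-- ===== VERDICT (by name: the statement is the Claim_ definition above) =====
theorem parse_llm_output_py_spec : Claim_equal_parse_llm_output_py := by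
  intro text _
  unfold Spec_parse_llm_output_py parse_llm_output_py parse_llm_output_py_alt lastPayload
  simp only [loopA_eq]
  cases hA : ((PySem.Str.split? text "\n").getD []).reverse.find?
      (fun l => PySem.Str.startswith (PySem.Str.lower l) "verdict:") <;>
  cases hB : ((PySem.Str.split? text "\n").getD []).reverse.find?
      (fun l => PySem.Str.startswith (PySem.Str.lower l) "explanation:") <;>
    simp
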